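-- pv_equiv track=rewrite | github.com/KasperFan/.CodePublic | ACM/CodeForces/WalkMaster.py | dfs
-- ===== SOURCE A (Python) =====
-- def dfs(a, b, c, d):
--     if d < b or d < c+b-a:
--         return -1
--     else:
--         if a == c and b == d:
--             return 0
--         else:
--             if a > c and b == d:
--                 return abs(a-c)
--             elif a == c and d == b+1:
--                 return 2
--             else:
--                 return (d-b)+dfs(a+(d-b), b+(d-b), c, d)
-- ===== SOURCE B (Python) =====
-- def dfs(a, b, c, d):
--     # Closed form: A's recursion has depth at most 2 (second call has b == d).
--     if d < b or d < c + b - a: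
--         return -1
--     if b == d:
--         return a - c  # guard rules out a < c; a == c gives 0
--     delta = d - b
--     ap = a + delta
--     return delta + ap - c if ap >= c else delta - 1
-- ===== Notes on version B (the rewrite author's own statement) =====
-- stated objective: simpler
-- what changed: Replaced the case-based recursion by a non-recursive closed form: after the guard, the b==d case returns a-c directly and the general case is computed arithmetically from delta=d-b (delta+a+delta-c if a+delta>=c else delta-1), using that A's recursion has depth at most 2.
import Mathlib
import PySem

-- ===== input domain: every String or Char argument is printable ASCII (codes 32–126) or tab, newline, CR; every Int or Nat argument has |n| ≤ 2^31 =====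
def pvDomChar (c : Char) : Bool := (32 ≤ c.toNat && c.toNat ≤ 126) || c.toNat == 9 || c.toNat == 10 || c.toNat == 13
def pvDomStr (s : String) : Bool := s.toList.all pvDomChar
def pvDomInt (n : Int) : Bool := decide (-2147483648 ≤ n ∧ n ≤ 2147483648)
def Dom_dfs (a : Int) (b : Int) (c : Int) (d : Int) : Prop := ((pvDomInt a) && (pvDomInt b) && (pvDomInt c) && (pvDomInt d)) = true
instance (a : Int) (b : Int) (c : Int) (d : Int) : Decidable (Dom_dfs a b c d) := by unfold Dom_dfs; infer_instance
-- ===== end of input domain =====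

-- B replaces A's (depth ≤ 2) recursion with a closed-form arithmetic expression; same values everywhere.
-- ===== PORT A =====
def dfs (a : Int) (b : Int) (c : Int) (d : Int) : Int :=
  if h1 : d < b ∨ d < c + b - a then -1
  else if _h2 : a = c ∧ b = d then 0
  else if _h3 : a > c ∧ b = d then ((a - c).natAbs : Int)
  else if _h4 : a = c ∧ d = b + 1 then 2
  else (d - b) + dfs (a + (d - b)) (b + (d - b)) c d
termination_by (d - b).toNat
decreasing_by omega

-- ===== PORT B =====
def dfs_alt (a : Int) (b : Int) (c : Int) (d : Int) : Int :=
  if d < b ∨ d < c + b - a then -1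
  else if b = d then a - c
  else
    let delta := d - b
    let ap := a + delta
    if ap ≥ c then delta + ap - c else delta - 1

-- ===== PRECONDITION & SPEC =====
def Spec_dfs (a : Int) (b : Int) (c : Int) (d : Int) (out : Int) : Prop := out = dfs_alt a b c d
instance (a : Int) (b : Int) (c : Int) (d : Int) (out : Int) : Decidable (Spec_dfs a b c d out) := by unfold Spec_dfs; infer_instance

-- ===== CLAIM (what is proved, stated in full; the proofs are below) =====
def Claim_equal_dfs : Prop := ∀ (a : Int) (b : Int) (c : Int) (d : Int), Dom_dfs a b c d → Spec_dfs a b c d (dfs a b c d)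

-- ===== LEMMAS AND PROOFS =====

-- ===== VERDICT (by name: the statement is the Claim_ definition above) =====
theorem dfs_spec : Claim_equal_dfs := by
  intro a b c d _
  unfold Spec_dfs dfs_alt
  dsimp only
  rw [dfs.eq_def]
  split_ifs with h1 h2 h3 h4 <;> try omega
  rw [dfs.eq_def]
  split_ifs <;> omega
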